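-- pv_equiv track=rewrite | github.com/nermadie/CodeForces_Solutions | CodeforcesRound994Div2/prob01.py | solve
-- ===== SOURCE A (Python) =====
-- def solve(n, a):
--     first_diff0_index = -1
--     last_diff0_index = -1
--     for i in range(n):
--         if a[i] != 0:
--             first_diff0_index = i
--             break
--     for i in range(n - 1, -1, -1):
--         if a[i] != 0:
--             last_diff0_index = i
--             break
--     if first_diff0_index == -1 and last_diff0_index == -1:
--         return 0
--     middle = a[first_diff0_index : last_diff0_index + 1]
--     result = 0
--     if 0 in middle:
--         result += 2
--     if first_diff0_index != -1 or last_diff0_index != -1: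
--         result += 1
--     return result if result <= 2 else 2
-- ===== SOURCE B (Python) =====
-- def solve(n, a):
--     seen_nonzero = False
--     pending_zeros = 0
--     zero_between = False
--     for x in a[:max(0, n)]:
--         if x != 0:
--             if seen_nonzero and pending_zeros > 0:
--                 zero_between = True
--             seen_nonzero = True
--             pending_zeros = 0
--         elif seen_nonzero:
--             pending_zeros += 1
--     if not seen_nonzero:
--         return 0
--     return 2 if zero_between else 1
-- ===== Notes on version B (the rewrite author's own statement) =====
-- stated objective: alternative
-- what changed: Replaced A's three scans (forward first-nonzero scan, backward last-nonzero scan, membership test on the slice between them) by a single left-to-right pass maintaining seen_nonzero/pending_zeros/zero_between state.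
import Mathlib
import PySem

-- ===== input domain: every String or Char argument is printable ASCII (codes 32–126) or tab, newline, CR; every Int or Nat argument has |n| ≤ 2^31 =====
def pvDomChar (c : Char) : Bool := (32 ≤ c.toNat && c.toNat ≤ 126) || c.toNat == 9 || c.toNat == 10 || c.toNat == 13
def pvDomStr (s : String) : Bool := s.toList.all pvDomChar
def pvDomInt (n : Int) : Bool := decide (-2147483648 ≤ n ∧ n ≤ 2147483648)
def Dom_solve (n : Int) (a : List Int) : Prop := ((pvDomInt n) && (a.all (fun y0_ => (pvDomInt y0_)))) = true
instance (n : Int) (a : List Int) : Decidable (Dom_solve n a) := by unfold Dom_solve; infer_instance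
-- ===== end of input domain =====

-- B replaces A's three scans (first-nonzero scan, last-nonzero scan, membership test on a slice)
-- by a single left-to-right pass maintaining running state (objective: alternative decomposition).

-- ===== PORT A =====
-- the 'for i in …: if a[i] != 0: …; break' loops of A, one scan over a list of indices
def solveScan (a : List Int) : List Int → Int
  | [] => -1
  | i :: rest => if PySem.List.pyGetD a i 0 ≠ 0 then i else solveScan a rest

def solve (n : Int) (a : List Int) : Int :=
  let first := solveScan a (PySem.List.pyRange 0 n 1)
  let last := solveScan a (PySem.List.pyRange (n - 1) (-1) (-1))
  if first = -1 ∧ last = -1 then 0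
  else
    let middle := PySem.List.slice a (some first) (some (last + 1))
    let result : Int := (if middle.contains 0 then 2 else 0) +
                        (if first ≠ -1 ∨ last ≠ -1 then 1 else 0)
    if result ≤ 2 then result else 2

-- ===== PORT B =====
-- state = (seen_nonzero, pending_zeros, zero_between)
def solveAltStep (s : Bool × Int × Bool) (x : Int) : Bool × Int × Bool :=
  if x ≠ 0 then
    (true, 0, if s.1 && decide (0 < s.2.1) then true else s.2.2)
  else if s.1 then (s.1, s.2.1 + 1, s.2.2) else s

def solve_alt (n : Int) (a : List Int) : Int :=
  let s := (PySem.List.slice a none (some (max 0 n))).foldl solveAltStep (false, 0, false)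
  if !s.1 then 0 else if s.2.2 then 2 else 1

-- ===== PRECONDITION & SPEC =====
-- Pre excludes exactly the inputs where A raises IndexError: n larger than len(a)
def Pre_solve (n : Int) (a : List Int) : Prop := n ≤ (a.length : Int)
instance (n : Int) (a : List Int) : Decidable (Pre_solve n a) := by unfold Pre_solve; infer_instance
def pvWitness_solve : Int × List Int := (4, [0, 1, 0, 2])
def Spec_solve (n : Int) (a : List Int) (out : Int) : Prop := out = solve_alt n a
instance (n : Int) (a : List Int) (out : Int) : Decidable (Spec_solve n a out) := by unfold Spec_solve; infer_instance

-- ===== CLAIM (what is proved, stated in full; the proofs are below) =====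
def Claim_equal_solve : Prop := ∀ (n : Int) (a : List Int), Dom_solve n a → Pre_solve n a → Spec_solve n a (solve n a)

-- ===== LEMMAS AND PROOFS =====

lemma solveScan_append (a xs ys : List Int) (hxs : (-1 : Int) ∉ xs) :
    solveScan a (xs ++ ys) = if solveScan a xs = -1 then solveScan a ys else solveScan a xs := by
  induction xs with
  | nil => simp [solveScan]
  | cons i xs ih =>
    have hi : i ≠ -1 := fun h => hxs (h ▸ List.mem_cons_self)
    have hxs' : (-1 : Int) ∉ xs := fun h => hxs (List.mem_cons_of_mem _ h)
    by_cases h : PySem.List.pyGetD a i 0 ≠ 0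
    · simp [solveScan, h, hi]
    · simp [solveScan, h, ih hxs']

lemma neg_one_not_mem_range (m : Int) : (-1 : Int) ∉ PySem.List.pyRange 0 m 1 := by
  intro h
  have := (PySem.List.mem_pyRange_one.mp h).1
  omega

lemma take_succ_getD (a : List Int) (m : Nat) (hm : m < a.length) :
    a.take (m + 1) = a.take m ++ [a.getD m 0] := by
  rw [List.take_succ, List.getElem?_eq_getElem hm, List.getD_eq_getElem a 0 hm]
  rfl

lemma drop_take_one (a : List Int) (m : Nat) (hm : m < a.length) :
    (a.drop m).take 1 = [a.getD m 0] := by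
  rw [List.drop_eq_getElem_cons hm, List.getD_eq_getElem a 0 hm]
  rfl

lemma mem_ext_zeros (a : List Int) (g m : Nat) (hg : g < m) (hm : m < a.length)
    (hz : ∀ j : Nat, g < j → j < m → a.getD j 0 = 0) (hx : a.getD m 0 ≠ 0) :
    ((0 : Int) ∈ (a.drop (g + 1)).take (m - g)) ↔ (g + 1 < m) := by
  constructor
  · intro hmem
    by_contra hlt
    have hmg : m = g + 1 := by omega
    subst hmg
    rw [Nat.add_sub_cancel_left] at hmem
    rw [drop_take_one a (g + 1) hm] at hmem
    simp at hmem
    exact hx hmem.symm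
  · intro hlt
    have hb : 0 < (a.drop (g + 1)).length := by
      rw [List.length_drop]; omega
    refine List.mem_iff_getElem.mpr ⟨0, ?_, ?_⟩
    · rw [List.length_take]; simp [List.length_drop]; omega
    · rw [List.getElem_take, List.getElem_drop]
      have := hz (g + 1) (by omega) (by omega)
      rwa [List.getD_eq_getElem a 0 (by omega)] at this

-- the invariant tying A's two scans to B's fold state over the same prefix
lemma solve_inv (a : List Int) : ∀ (m : Nat), m ≤ a.length →
    (solveScan a (PySem.List.pyRange 0 (m : Int) 1) = -1 ∧
     solveScan a (PySem.List.pyRange ((m : Int) - 1) (-1) (-1)) = -1 ∧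
     (a.take m).foldl solveAltStep (false, 0, false) = (false, 0, false))
    ∨ (∃ f g : Nat,
        solveScan a (PySem.List.pyRange 0 (m : Int) 1) = (f : Int) ∧
        solveScan a (PySem.List.pyRange ((m : Int) - 1) (-1) (-1)) = (g : Int) ∧
        f ≤ g ∧ g < m ∧
        (∀ j : Nat, g < j → j < m → a.getD j 0 = 0) ∧
        (a.take m).foldl solveAltStep (false, 0, false)
          = (true, (m : Int) - 1 - (g : Int),
             ((a.drop f).take (g + 1 - f)).contains 0)) := by
  intro m
  induction m with
  | zero =>
    intro _
    left
    refine ⟨?_, ?_, rfl⟩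
    · rw [PySem.List.pyRange_one_eq_nil (by omega)]; rfl
    · rw [PySem.List.pyRange_neg_one_eq_nil (by omega)]; rfl
  | succ m ih =>
    intro hm1
    have hlt : m < a.length := by omega
    have hFsplit : PySem.List.pyRange 0 ((m : Int) + 1) 1
        = PySem.List.pyRange 0 (m : Int) 1 ++ [(m : Int)] :=
      PySem.List.pyRange_one_succ_right (by omega)
    have hLsplit : PySem.List.pyRange ((m : Int)) (-1) (-1)
        = (m : Int) :: PySem.List.pyRange ((m : Int) - 1) (-1) (-1) :=
      PySem.List.pyRange_neg_one_cons (by omega)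
    have hgd : a.getD m 0 = a[m] := List.getD_eq_getElem a 0 hlt
    have hget : PySem.List.pyGetD a (m : Int) 0 = a[m] := by
      rw [PySem.List.pyGetD_natCast, hgd]
    have hcast1 : ((m + 1 : Nat) : Int) = (m : Int) + 1 := by push_cast; ring
    have hcast2 : ((m + 1 : Nat) : Int) - 1 = (m : Int) := by push_cast; ring
    have htake : a.take (m + 1) = a.take m ++ [a[m]] := by
      rw [take_succ_getD a m hlt, hgd]
    rcases ih (by omega) with ⟨h1, h2, h3⟩ | ⟨f, g, hF, hL, hfg, hgm, hz, hS⟩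
    · by_cases hx : a[m] ≠ 0
      · -- first nonzero appears at index m
        right
        refine ⟨m, m, ?_, ?_, le_refl m, by omega, ?_, ?_⟩
        · rw [hcast1, hFsplit, solveScan_append a _ _ (neg_one_not_mem_range _), h1]
          simp [solveScan, hget, hx]
        · rw [hcast2, hLsplit]
          simp [solveScan, hget, hx]
        · intro j hj1 hj2; omega
        · rw [htake, List.foldl_append, h3]
          have hrest : (a.drop m).take (m + 1 - m) = [a[m]] := by
            rw [Nat.add_sub_cancel_left, drop_take_one a m hlt, hgd]
          rw [hrest, hcast1]
          simp [solveAltStep, hx, Prod.ext_iff]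
          omega
      · -- still all zeros
        rw [not_not] at hx
        left
        refine ⟨?_, ?_, ?_⟩
        · rw [hcast1, hFsplit, solveScan_append a _ _ (neg_one_not_mem_range _), h1]
          simp [solveScan, hget, hx]
        · rw [hcast2, hLsplit, h2.symm]
          simp [solveScan, hget, hx, h2]
        · rw [htake, List.foldl_append, h3]
          simp [solveAltStep, hx]
    · by_cases hx : a[m] ≠ 0
      · -- new last nonzero at index m
        right
        refine ⟨f, m, ?_, ?_, by omega, by omega, by omega, ?_⟩
        · rw [hcast1, hFsplit, solveScan_append a _ _ (neg_one_not_mem_range _), hF]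
          simp
        · rw [hcast2, hLsplit]
          simp [solveScan, hget, hx]
        · rw [htake, List.foldl_append, hS]
          have hsplit : (a.drop f).take (m + 1 - f)
              = (a.drop f).take (g + 1 - f) ++ (a.drop (g + 1)).take (m - g) := by
            have h1' : m + 1 - f = (g + 1 - f) + (m - g) := by omega
            rw [h1', List.take_add, List.drop_drop]
            have h2' : f + (g + 1 - f) = g + 1 := by omega
            rw [h2']
          simp only [List.foldl_cons, List.foldl_nil, solveAltStep, if_pos hx]
          simp only [Prod.mk.injEq, true_and]
          constructor
          · rw [hcast1]; ring
          · rw [hsplit]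
            by_cases hgm2 : g + 1 < m
            · have hdec : (0 < (m : Int) - 1 - (g : Int)) := by omega
              have hmem : (0 : Int) ∈ (a.drop (g + 1)).take (m - g) :=
                (mem_ext_zeros a g m (by omega) hlt hz (by rwa [hgd])).mpr hgm2
              simp [hmem]
              exact Or.inl (by omega)
            · have hdec : ¬ (0 < (m : Int) - 1 - (g : Int)) := by omega
              have hmem : ¬ (0 : Int) ∈ (a.drop (g + 1)).take (m - g) := by
                rw [mem_ext_zeros a g m (by omega) hlt hz (by rwa [hgd])]; omega
              simp [hmem]
              intro h; omega
      · -- a zero after the last nonzero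
        rw [not_not] at hx
        right
        refine ⟨f, g, ?_, ?_, hfg, by omega, ?_, ?_⟩
        · rw [hcast1, hFsplit, solveScan_append a _ _ (neg_one_not_mem_range _), hF]
          simp
        · rw [hcast2, hLsplit]
          simp [solveScan, hget, hx, hL]
        · intro j hj1 hj2
          by_cases hjm : j = m
          · rw [hjm, hgd]; exact hx
          · exact hz j hj1 (by omega)
        · rw [htake, List.foldl_append, hS]
          simp [solveAltStep, hx, hcast1]
          ring

-- ===== VERDICT (by name: the statement is the Claim_ definition above) =====
theorem solve_spec : Claim_equal_solve := by
  intro n a _ hpre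
  unfold Spec_solve solve solve_alt
  by_cases hn : 0 ≤ n
  · have hmn : ((n.toNat : Int)) = n := Int.toNat_of_nonneg hn
    have hm : n.toNat ≤ a.length := by
      unfold Pre_solve at hpre; omega
    have hmax : max 0 n = n := by omega
    have hsl : PySem.List.slice a none (some (max 0 n)) = a.take n.toNat := by
      rw [hmax, PySem.List.slice_to a hn]
    rw [hsl]
    rcases solve_inv a n.toNat hm with ⟨h1, h2, h3⟩ | ⟨f, g, hF, hL, hfg, hgm, hz, hS⟩
    · rw [hmn] at h1 h2
      simp [h1, h2, h3]
    · rw [hmn] at hF hL hS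
      have hf1 : (f : Int) ≠ -1 := by omega
      have hg1 : (g : Int) ≠ -1 := by omega
      have hmid : PySem.List.slice a (some (f : Int)) (some ((g : Int) + 1))
          = (a.drop f).take (g + 1 - f) := by
        have : ((g : Int) + 1) = ((g + 1 : Nat) : Int) := by push_cast; ring
        rw [this, PySem.List.slice_natCast]
      rw [hF, hL, hS]
      by_cases hc : (0 : Int) ∈ (a.drop f).take (g + 1 - f)
      · simp [hmid, hf1, hg1, hc]
      · simp [hmid, hf1, hg1, hc]
  · have h1 : PySem.List.pyRange 0 n 1 = [] := PySem.List.pyRange_one_eq_nil (by omega)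
    have h2 : PySem.List.pyRange (n - 1) (-1) (-1) = [] := PySem.List.pyRange_neg_one_eq_nil (by omega)
    have hmax : max 0 n = 0 := by omega
    have hsl : PySem.List.slice a none (some (max 0 n)) = a.take (0 : Int).toNat := by
      rw [hmax]; exact PySem.List.slice_to a (by omega)
    rw [h1, h2, hsl]
    simp [solveScan]
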